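-- pv_equiv track=rewrite | github.com/scscodes/py-celery-sample | app/tasks/enterprise/backup_recovery.py | organize_recovery_phases
-- ===== SOURCE A (Python) =====
-- from typing import List, Dict, Any, Optional
--
-- def organize_recovery_phases(systems: List[Dict[str, Any]]) -> Dict[int, List[Dict[str, Any]]]:
--     """Organize systems into recovery phases."""
--     phases = {}
--
--     # Group by data tier priority
--     critical_systems = [s for s in systems if s.get("data_tier") == "critical"]
--     important_systems = [s for s in systems if s.get("data_tier") == "important"]
--     standard_systems = [s for s in systems if s.get("data_tier") == "standard"]
--
--     if critical_systems:
--         phases[1] = critical_systems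
--     if important_systems:
--         phases[2] = important_systems
--     if standard_systems:
--         phases[3] = standard_systems
--
--     return phases
-- ===== SOURCE B (Python) =====
-- from typing import List, Dict, Any
--
-- def organize_recovery_phases(systems: List[Dict[str, Any]]) -> Dict[int, List[Dict[str, Any]]]:
--     """Organize systems into recovery phases (single pass over systems)."""
--     buckets = {"critical": [], "important": [], "standard": []}
--     for s in systems:
--         tier = s.get("data_tier")
--         if tier in buckets:
--             buckets[tier].append(s)
--     phases = {}
--     for tier, phase in (("critical", 1), ("important", 2), ("standard", 3)):
--         if buckets[tier]:
--             phases[phase] = buckets[tier]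
--     return phases
-- ===== Notes on version B (the rewrite author's own statement) =====
-- stated objective: simpler
-- what changed: Replaced three separate filtering passes over the systems list by a single loop that appends each system to its tier's bucket, then emits non-empty buckets in phase order.
import Mathlib
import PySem

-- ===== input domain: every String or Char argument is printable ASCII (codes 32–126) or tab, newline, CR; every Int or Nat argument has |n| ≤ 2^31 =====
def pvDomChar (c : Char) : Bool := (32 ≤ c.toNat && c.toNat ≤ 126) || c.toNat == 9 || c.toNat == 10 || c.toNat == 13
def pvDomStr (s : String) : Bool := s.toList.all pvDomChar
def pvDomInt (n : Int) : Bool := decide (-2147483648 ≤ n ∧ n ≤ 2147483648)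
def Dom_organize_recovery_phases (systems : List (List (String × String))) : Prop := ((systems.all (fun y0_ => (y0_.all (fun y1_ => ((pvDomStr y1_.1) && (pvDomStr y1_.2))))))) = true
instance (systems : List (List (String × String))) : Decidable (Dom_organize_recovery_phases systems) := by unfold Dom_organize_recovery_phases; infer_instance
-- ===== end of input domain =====

-- B replaces A's three list-comprehension passes by one bucketing loop; objective: simpler (one pass).

-- shared helper: Python's s.get("data_tier") on an association list (first match)
def pvGetTier (s : List (String × String)) : Option String :=
  (s.find? (fun kv => kv.1 == "data_tier")).map (·.2)

-- ===== PORT A =====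
def organize_recovery_phases (systems : List (List (String × String))) : List (Int × List (List (String × String))) :=
  let phases : List (Int × List (List (String × String))) := []
  let critical_systems := systems.filter (fun s => pvGetTier s == some "critical")
  let important_systems := systems.filter (fun s => pvGetTier s == some "important")
  let standard_systems := systems.filter (fun s => pvGetTier s == some "standard")
  let phases := if critical_systems.isEmpty then phases else phases ++ [(1, critical_systems)]
  let phases := if important_systems.isEmpty then phases else phases ++ [(2, important_systems)]
  let phases := if standard_systems.isEmpty then phases else phases ++ [(3, standard_systems)]
  phases

-- ===== PORT B =====
-- one loop appending each system to its tier's bucket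
def pvBucketStep (acc : List (List (String × String)) × List (List (String × String)) × List (List (String × String)))
    (s : List (String × String)) :
    List (List (String × String)) × List (List (String × String)) × List (List (String × String)) :=
  match pvGetTier s with
  | some t =>
    if t == "critical" then (acc.1 ++ [s], acc.2.1, acc.2.2)
    else if t == "important" then (acc.1, acc.2.1 ++ [s], acc.2.2)
    else if t == "standard" then (acc.1, acc.2.1, acc.2.2 ++ [s])
    else acc
  | none => acc

def organize_recovery_phases_alt (systems : List (List (String × String))) : List (Int × List (List (String × String))) :=
  let buckets := systems.foldl pvBucketStep ([], [], [])
  (if buckets.1.isEmpty then [] else [((1 : Int), buckets.1)]) ++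
  (if buckets.2.1.isEmpty then [] else [((2 : Int), buckets.2.1)]) ++
  (if buckets.2.2.isEmpty then [] else [((3 : Int), buckets.2.2)])

-- ===== PRECONDITION & SPEC =====
def Spec_organize_recovery_phases (systems : List (List (String × String))) (out : List (Int × List (List (String × String)))) : Prop := out = organize_recovery_phases_alt systems
instance (systems : List (List (String × String))) (out : List (Int × List (List (String × String)))) : Decidable (Spec_organize_recovery_phases systems out) := by unfold Spec_organize_recovery_phases; infer_instance

-- ===== CLAIM (what is proved, stated in full; the proofs are below) =====
def Claim_equal_organize_recovery_phases : Prop := ∀ (systems : List (List (String × String))), Dom_organize_recovery_phases systems → Spec_organize_recovery_phases systems (organize_recovery_phases systems)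

-- ===== LEMMAS AND PROOFS =====

-- the bucketing fold computes the three filters (appended to the accumulators)
theorem pvFold_eq_filters (systems : List (List (String × String)))
    (c i st : List (List (String × String))) :
    systems.foldl pvBucketStep (c, i, st) =
      (c ++ systems.filter (fun s => pvGetTier s == some "critical"),
       i ++ systems.filter (fun s => pvGetTier s == some "important"),
       st ++ systems.filter (fun s => pvGetTier s == some "standard")) := by
  induction systems generalizing c i st with
  | nil => simp
  | cons s rest ih =>
    simp only [List.foldl_cons, List.filter_cons]
    rw [ih]
    unfold pvBucketStep
    cases h : pvGetTier s with
    | none => simp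
    | some t =>
      by_cases hc : t = "critical"
      · subst hc; simp
      · by_cases hi : t = "important"
        · subst hi; simp
        · by_cases hs : t = "standard"
          · subst hs; simp
          · have hc' : (t == "critical") = false := by simp [hc]
            have hi' : (t == "important") = false := by simp [hi]
            have hs' : (t == "standard") = false := by simp [hs]
            simp [hc', hi', hs',
              show (some t == some "critical") = false by simp [hc],
              show (some t == some "important") = false by simp [hi],
              show (some t == some "standard") = false by simp [hs]]

-- ===== VERDICT (by name: the statement is the Claim_ definition above) =====
theorem organize_recovery_phases_spec : Claim_equal_organize_recovery_phases := by
  intro systems _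
  unfold Spec_organize_recovery_phases organize_recovery_phases organize_recovery_phases_alt
  rw [pvFold_eq_filters]
  simp only [List.nil_append]
  split_ifs <;> simp_all
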